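-- pv_equiv track=rewrite | github.com/Sameerkundusam/dsa_in_python | Day 2 Lists, If Else Elif, Loops/Palindromic_Staircase.py | solve
-- ===== SOURCE A (Python) =====
-- def solve(n):
--     # CODE HERE
--
--     palindrom_str = []
--     for i in range(1,n+1):
--         s = ""
--         for j in range(1,i+1):
--             s+=str(j)
--         for k in range(i-1,0,-1):
--             s+=str(k)
--         palindrom_str.append(s)
--     return palindrom_str
-- ===== SOURCE B (Python) =====
-- def solve(n):
--     # Single pass with incremental ascending/descending accumulator strings;
--     # no inner reconstruction loops.
--     res = []
--     asc = ""
--     desc = ""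
--     for i in range(1, n + 1):
--         asc += str(i)
--         res.append(asc + desc)
--         desc = str(i) + desc
--     return res
-- ===== Notes on version B (the rewrite author's own statement) =====
-- stated objective: faster
-- what changed: Replaces A's two inner per-row reconstruction loops with a single pass that threads incremental ascending/descending accumulator strings across the rows.
import Mathlib
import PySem

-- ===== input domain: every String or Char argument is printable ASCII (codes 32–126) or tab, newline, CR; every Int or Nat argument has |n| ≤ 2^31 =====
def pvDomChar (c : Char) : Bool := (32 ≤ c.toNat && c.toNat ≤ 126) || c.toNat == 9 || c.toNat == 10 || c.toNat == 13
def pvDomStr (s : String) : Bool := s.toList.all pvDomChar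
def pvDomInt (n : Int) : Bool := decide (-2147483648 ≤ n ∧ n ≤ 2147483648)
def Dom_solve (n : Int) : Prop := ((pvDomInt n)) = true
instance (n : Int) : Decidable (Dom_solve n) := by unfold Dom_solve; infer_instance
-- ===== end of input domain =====

-- B replaces A's two inner per-row reconstruction loops with one pass threading
-- incremental ascending/descending accumulator strings (objective: faster, constant-factor).

-- ===== PORT A =====
def solve (n : Int) : List String :=
  (PySem.List.pyRange 1 (n+1) 1).foldl
    (fun acc i =>
      let s : String := (PySem.List.pyRange 1 (i+1) 1).foldl
        (fun s j => s ++ PySem.Int.toStr j) ""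
      let s : String := (PySem.List.pyRange (i-1) 0 (-1)).foldl
        (fun s k => s ++ PySem.Int.toStr k) s
      acc ++ [s]) []

-- ===== PORT B =====
def solve_alt (n : Int) : List String :=
  ((PySem.List.pyRange 1 (n+1) 1).foldl
    (fun (st : String × String × List String) i =>
      let asc := st.1 ++ PySem.Int.toStr i
      (asc, PySem.Int.toStr i ++ st.2.1, st.2.2 ++ [asc ++ st.2.1]))
    ("", "", [])).2.2

-- ===== PRECONDITION & SPEC =====
def Spec_solve (n : Int) (out : List String) : Prop := out = solve_alt n
instance (n : Int) (out : List String) : Decidable (Spec_solve n out) := by unfold Spec_solve; infer_instance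

-- ===== CLAIM (what is proved, stated in full; the proofs are below) =====
def Claim_equal_solve : Prop := ∀ (n : Int), Dom_solve n → Spec_solve n (solve n)

-- ===== LEMMAS AND PROOFS =====

/-- Ascending digit string "12…i" (A's first inner loop / B's `asc` after row i). -/
def ascStr (i : Int) : String :=
  (PySem.List.pyRange 1 (i+1) 1).foldl (fun s j => s ++ PySem.Int.toStr j) ""

/-- Descending digit string "i…21" (B's `desc` after row i). -/
def descStr (i : Int) : String :=
  (PySem.List.pyRange i 0 (-1)).foldl (fun s k => s ++ PySem.Int.toStr k) ""

lemma strFoldl_init (f : Int → String) (l : List Int) (s0 : String) :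
    l.foldl (fun s k => s ++ f k) s0 = s0 ++ l.foldl (fun s k => s ++ f k) "" := by
  induction l generalizing s0 with
  | nil => simp
  | cons x xs ih =>
    simp only [List.foldl_cons]
    rw [ih (s0 ++ f x), ih ("" ++ f x)]
    simp [String.append_assoc]

lemma ascStr_succ (i : Int) (h : 1 ≤ i) :
    ascStr i = ascStr (i-1) ++ PySem.Int.toStr i := by
  unfold ascStr
  rw [PySem.List.pyRange_one_succ_right h, List.foldl_append]
  have h1 : i - 1 + 1 = i := by ring
  rw [h1]
  simp

lemma descStr_succ (i : Int) (h : 1 ≤ i) :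
    descStr i = PySem.Int.toStr i ++ descStr (i-1) := by
  unfold descStr
  rw [PySem.List.pyRange_neg_one_cons (by omega : (0:Int) < i)]
  simp only [List.foldl_cons]
  rw [strFoldl_init]
  simp

lemma solve_succ (i : Int) (h : 1 ≤ i) :
    solve i = solve (i-1) ++ [ascStr i ++ descStr (i-1)] := by
  unfold solve
  have h1 : i - 1 + 1 = i := by ring
  rw [PySem.List.pyRange_one_succ_right h, h1, List.foldl_append]
  simp only [List.foldl_cons, List.foldl_nil]
  congr 1
  rw [strFoldl_init]
  rfl

lemma main_inv (m : Nat) :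
    (PySem.List.pyRange 1 ((m:Int)+1) 1).foldl
      (fun (st : String × String × List String) i =>
        let asc := st.1 ++ PySem.Int.toStr i
        (asc, PySem.Int.toStr i ++ st.2.1, st.2.2 ++ [asc ++ st.2.1]))
      ("", "", [])
    = (ascStr (m:Int), descStr (m:Int), solve (m:Int)) := by
  induction m with
  | zero =>
    decide
  | succ m ih =>
    have hcast : (((m+1 : Nat)) : Int) = (m:Int) + 1 := by push_cast; ring
    rw [hcast,
      PySem.List.pyRange_one_succ_right (by omega : (1:Int) ≤ (m:Int)+1),
      List.foldl_append, ih]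
    have hasc : ascStr ((m:Int)+1) = ascStr (m:Int) ++ PySem.Int.toStr ((m:Int)+1) := by
      have := ascStr_succ ((m:Int)+1) (by omega); simpa using this
    have hdesc : descStr ((m:Int)+1) = PySem.Int.toStr ((m:Int)+1) ++ descStr (m:Int) := by
      have := descStr_succ ((m:Int)+1) (by omega); simpa using this
    have hsolve : solve ((m:Int)+1)
        = solve (m:Int) ++ [ascStr ((m:Int)+1) ++ descStr (m:Int)] := by
      have := solve_succ ((m:Int)+1) (by omega); simpa using this
    simp only [List.foldl_cons, List.foldl_nil]
    rw [hsolve, hasc, hdesc]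

-- ===== VERDICT (by name: the statement is the Claim_ definition above) =====
theorem solve_spec : Claim_equal_solve := by
  intro n _
  unfold Spec_solve
  by_cases h : n ≤ 0
  · have hnil : PySem.List.pyRange 1 (n+1) 1 = [] :=
      PySem.List.pyRange_one_eq_nil (by omega)
    simp [solve, solve_alt, hnil]
  · have hn : ((n.toNat : Int)) = n := Int.toNat_of_nonneg (by omega)
    have hinv := main_inv n.toNat
    rw [hn] at hinv
    rw [solve_alt, hinv]
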